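-- pv_equiv track=rewrite | github.com/Danielfoojunwei/TenSafe-Homormorphically-Encrypted-LoRA-Adaptation | src/he_lora_microkernel/compiler/packer.py | compute_optimal_block_size
-- ===== SOURCE A (Python) =====
-- def compute_optimal_block_size(
--     hidden_size: int,
--     batch_size: int,
--     slot_count: int,
--     target_blocks: int = 8,
-- ) -> int:
--     """
--     Compute optimal block size for packing.
--
--     Goals:
--       1. Fit batch_size × block_size slots per block
--       2. Minimize number of blocks (fewer cross-block rotations)
--       3. Keep block size as power of 2 for efficient rotations
--
--     Args:
--         hidden_size: Model hidden dimension
--         batch_size: Batch size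
--         slot_count: Available SIMD slots
--         target_blocks: Preferred number of blocks (if achievable)
--
--     Returns:
--         Optimal block size (power of 2)
--     """
--     # Maximum slots per block
--     max_slots_per_block = slot_count  # Use full capacity (Zero Rotation critical)
--
--     # Maximum channels per block given batch size
--     max_channels_per_block = max_slots_per_block // batch_size
--
--     # Find largest power of 2 <= max_channels_per_block
--     block_size = 1
--     while block_size * 2 <= max_channels_per_block:
--         block_size *= 2
--
--     # Cap at 4096 (larger models support) - enable Zero Rotation for 4096 hidden
--     block_size = min(block_size, 4096)
--
--     # Ensure at least 64 channels per block
--     block_size = max(block_size, 64)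
--
--     return block_size
-- ===== SOURCE B (Python) =====
-- def compute_optimal_block_size(
--     hidden_size: int,
--     batch_size: int,
--     slot_count: int,
--     target_blocks: int = 8,
-- ) -> int:
--     """Closed-form variant: largest power of two <= slot_count // batch_size
--     via bit_length, then the same [64, 4096] clamps."""
--     n = slot_count // batch_size
--     block_size = (1 << (n.bit_length() - 1)) if n >= 1 else 1
--     return max(min(block_size, 4096), 64)
-- ===== Notes on version B (the rewrite author's own statement) =====
-- stated objective: simpler
-- what changed: The doubling while-loop that searches the largest power of two <= slot_count//batch_size is replaced by the closed form 1 << (n.bit_length()-1) (with n < 1 falling back to 1), keeping the same division and the same min/max clamps.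
import Mathlib
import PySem

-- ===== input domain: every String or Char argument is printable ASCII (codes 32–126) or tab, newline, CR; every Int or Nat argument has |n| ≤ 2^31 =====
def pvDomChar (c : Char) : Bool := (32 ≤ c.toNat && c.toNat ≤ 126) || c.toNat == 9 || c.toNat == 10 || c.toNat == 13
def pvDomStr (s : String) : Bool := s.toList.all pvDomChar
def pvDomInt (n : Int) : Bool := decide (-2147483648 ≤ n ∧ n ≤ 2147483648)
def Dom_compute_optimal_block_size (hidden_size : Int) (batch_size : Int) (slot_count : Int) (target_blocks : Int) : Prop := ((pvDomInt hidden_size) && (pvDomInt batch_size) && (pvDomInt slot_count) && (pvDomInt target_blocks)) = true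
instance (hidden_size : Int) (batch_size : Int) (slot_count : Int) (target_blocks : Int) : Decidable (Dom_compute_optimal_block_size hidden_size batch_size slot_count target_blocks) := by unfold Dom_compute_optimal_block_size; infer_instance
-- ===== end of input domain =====

-- ===== PORT A =====
-- B replaces A's doubling while-loop by the bit_length closed form (objective: simpler).
-- the while loop of A: the guard 0 < bs only makes the recursion total (always true from bs = 1)
def cobsLoop (m : Int) (bs : Int) : Int :=
  if h : 0 < bs ∧ bs * 2 ≤ m then cobsLoop m (bs * 2) else bs
  termination_by (m - bs).toNat
  decreasing_by omega

def compute_optimal_block_size (hidden_size : Int) (batch_size : Int) (slot_count : Int) (target_blocks : Int) : Int :=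
  let max_slots_per_block := slot_count
  let max_channels_per_block := PySem.Int.floordiv max_slots_per_block batch_size
  let block_size := cobsLoop max_channels_per_block 1
  let block_size := min block_size 4096
  let block_size := max block_size 64
  block_size

-- ===== PORT B =====
-- 1 << (n.bit_length() - 1) is ported as (2:Int) ^ (PySem.Int.bitLength n - 1) (exact: left shift of 1 by k is 2^k)
def compute_optimal_block_size_alt (hidden_size : Int) (batch_size : Int) (slot_count : Int) (target_blocks : Int) : Int :=
  let n := PySem.Int.floordiv slot_count batch_size
  let block_size := if 1 ≤ n then (2 : Int) ^ (PySem.Int.bitLength n - 1) else 1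
  max (min block_size 4096) 64

-- ===== PRECONDITION & SPEC =====
-- Pre_ excludes exactly batch_size = 0, where the Python A raises ZeroDivisionError.
def Pre_compute_optimal_block_size (hidden_size : Int) (batch_size : Int) (slot_count : Int) (target_blocks : Int) : Prop := batch_size ≠ 0
instance (hidden_size : Int) (batch_size : Int) (slot_count : Int) (target_blocks : Int) : Decidable (Pre_compute_optimal_block_size hidden_size batch_size slot_count target_blocks) := by unfold Pre_compute_optimal_block_size; infer_instance

def pvWitness_compute_optimal_block_size : Int × Int × Int × Int := (4096, 1, 8192, 8)

def Spec_compute_optimal_block_size (hidden_size : Int) (batch_size : Int) (slot_count : Int) (target_blocks : Int) (out : Int) : Prop := out = compute_optimal_block_size_alt hidden_size batch_size slot_count target_blocks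
instance (hidden_size : Int) (batch_size : Int) (slot_count : Int) (target_blocks : Int) (out : Int) : Decidable (Spec_compute_optimal_block_size hidden_size batch_size slot_count target_blocks out) := by unfold Spec_compute_optimal_block_size; infer_instance

-- ===== CLAIM (what is proved, stated in full; the proofs are below) =====
def Claim_equal_compute_optimal_block_size : Prop := ∀ (hidden_size : Int) (batch_size : Int) (slot_count : Int) (target_blocks : Int), Dom_compute_optimal_block_size hidden_size batch_size slot_count target_blocks → Pre_compute_optimal_block_size hidden_size batch_size slot_count target_blocks → Spec_compute_optimal_block_size hidden_size batch_size slot_count target_blocks (compute_optimal_block_size hidden_size batch_size slot_count target_blocks)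

-- ===== LEMMAS AND PROOFS =====

-- The doubling loop, started at any power of two 2^j ≤ m (m ≥ 1), stops at the
-- largest power of two ≤ m, which is 2^(bitLength m - 1).
lemma cobsLoop_pow (m : Int) (hm : 1 ≤ m) (j : Nat) (hj : (2:Int)^j ≤ m) :
    cobsLoop m ((2:Int)^j) = (2:Int)^(PySem.Int.bitLength m - 1) := by
  have hne : m ≠ 0 := by omega
  have h1 : (2:Nat) ^ (PySem.Int.bitLength m - 1) ≤ m.natAbs := PySem.Int.two_pow_bitLength_le m hne
  have h2 : m.natAbs < 2 ^ PySem.Int.bitLength m := PySem.Int.lt_two_pow_bitLength m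
  have hBpos : 1 ≤ PySem.Int.bitLength m := by
    by_contra h
    have : PySem.Int.bitLength m = 0 := by omega
    rw [this] at h2; simp at h2; omega
  set L := PySem.Int.bitLength m - 1 with hLdef
  have hNA : (m.natAbs : Int) = m := Int.natAbs_of_nonneg (by omega)
  have hL1 : (2:Int) ^ L ≤ m := by
    calc (2:Int) ^ L = ((2 ^ L : Nat) : Int) := by push_cast; ring
    _ ≤ (m.natAbs : Int) := by exact_mod_cast h1
    _ = m := hNA
  have hL2 : m < (2:Int) ^ (L + 1) := by
    have : PySem.Int.bitLength m = L + 1 := by omega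
    calc m = (m.natAbs : Int) := hNA.symm
    _ < ((2 ^ (L + 1) : Nat) : Int) := by exact_mod_cast this ▸ h2
    _ = (2:Int) ^ (L + 1) := by push_cast; ring
  suffices H : ∀ k j, L - j = k → (2:Int)^j ≤ m → cobsLoop m ((2:Int)^j) = (2:Int)^L from
    H (L - j) j rfl hj
  intro k
  induction k with
  | zero =>
    intro j hk hj
    have hjL : j ≤ L := by
      by_contra h
      have : L + 1 ≤ j := by omega
      have : (2:Int) ^ (L + 1) ≤ (2:Int) ^ j := pow_le_pow_right₀ (by norm_num) this
      omega
    have hjeq : j = L := by omega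
    rw [cobsLoop]
    have : ¬ (0 < (2:Int)^j ∧ (2:Int)^j * 2 ≤ m) := by
      rintro ⟨-, h⟩
      rw [hjeq] at h
      have : (2:Int) ^ (L + 1) = (2:Int)^L * 2 := by ring
      omega
    rw [dif_neg this, hjeq]
  | succ k ih =>
    intro j hk hj
    have hjL : j + 1 ≤ L := by omega
    have hnext : (2:Int) ^ (j + 1) ≤ m :=
      le_trans (pow_le_pow_right₀ (by norm_num) hjL) hL1
    rw [cobsLoop]
    have hc : 0 < (2:Int)^j ∧ (2:Int)^j * 2 ≤ m := by
      constructor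
      · positivity
      · have : (2:Int) ^ (j + 1) = (2:Int)^j * 2 := by ring
        omega
    rw [dif_pos hc]
    have : (2:Int)^j * 2 = (2:Int)^(j+1) := by ring
    rw [this]
    exact ih (j + 1) (by omega) hnext

-- When m < 1 the loop guard fails immediately and the loop returns 1.
lemma cobsLoop_of_lt_one (m : Int) (hm : ¬ 1 ≤ m) : cobsLoop m 1 = 1 := by
  rw [cobsLoop]
  rw [dif_neg]
  rintro ⟨-, h⟩
  omega

-- ===== VERDICT (by name: the statement is the Claim_ definition above) =====
theorem compute_optimal_block_size_spec : Claim_equal_compute_optimal_block_size := by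
  intro hidden_size batch_size slot_count target_blocks _ _
  unfold Spec_compute_optimal_block_size compute_optimal_block_size compute_optimal_block_size_alt
  simp only
  set n := PySem.Int.floordiv slot_count batch_size with hn
  by_cases h : 1 ≤ n
  · have h0 : cobsLoop n 1 = (2:Int)^(PySem.Int.bitLength n - 1) := by
      have := cobsLoop_pow n h 0 (by simpa using h)
      simpa using this
    rw [h0, if_pos h]
  · rw [cobsLoop_of_lt_one n h, if_neg h]
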